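-- pv_equiv track=rewrite | github.com/thynaptic/oricli-alpha | mavaia_core/brain/modules/python_security_analysis.py | _assess_injection_risk_level
-- ===== SOURCE A (Python) =====
-- from typing import Any, Dict, List, Optional, Set, Tuple, Union
--
-- def _assess_injection_risk_level(risks: List[Dict[str, Any]]) -> str:
--     """Assess overall injection risk level."""
--     if not risks:
--         return "low"
--
--     critical_risks = [r for r in risks if r.get("severity") == "critical"]
--     if critical_risks:
--         return "critical"
--
--     high_risks = [r for r in risks if r.get("severity") == "high"]
--     if high_risks:
--         return "high"
--
--     return "medium"
-- ===== SOURCE B (Python) =====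
-- from typing import Any, Dict, List
--
-- _RANK = {"critical": 3, "high": 2}
--
-- def _assess_injection_risk_level(risks: List[Dict[str, Any]]) -> str:
--     """Assess overall injection risk level."""
--     level = 0
--     for r in risks:
--         level = max(level, _RANK.get(r.get("severity"), 1))
--     return ["low", "medium", "high", "critical"][level]
-- ===== Notes on version B (the rewrite author's own statement) =====
-- stated objective: alternative
-- what changed: Replaces A's staged filtered-list scans with one max-reduction over numeric severity ranks (critical=3, high=2, other=1, empty stays 0) followed by a table lookup of the level name.
import Mathlib
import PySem

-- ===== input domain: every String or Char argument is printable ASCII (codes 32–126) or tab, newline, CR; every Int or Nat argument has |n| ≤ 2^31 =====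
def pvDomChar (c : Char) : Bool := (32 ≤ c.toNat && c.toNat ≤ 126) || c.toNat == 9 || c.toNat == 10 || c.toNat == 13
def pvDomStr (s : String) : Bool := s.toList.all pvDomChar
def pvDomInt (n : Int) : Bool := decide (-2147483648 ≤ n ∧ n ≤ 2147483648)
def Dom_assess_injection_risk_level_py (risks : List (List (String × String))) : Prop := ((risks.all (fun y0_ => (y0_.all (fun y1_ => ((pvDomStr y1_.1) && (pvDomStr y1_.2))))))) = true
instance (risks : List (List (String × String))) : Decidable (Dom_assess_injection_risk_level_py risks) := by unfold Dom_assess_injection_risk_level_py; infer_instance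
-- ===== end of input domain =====

-- B replaces A's staged filtered-list scans with one max-reduction over numeric
-- severity ranks followed by a table lookup (alternative decomposition; same cost).


-- ===== PORT A =====
def assess_injection_risk_level_py (risks : List (List (String × String))) : String :=
  if risks.isEmpty then "low"
  else
    let critical_risks := risks.filter (fun r => (PySem.Dict.mk r).get? "severity" == some "critical")
    if !critical_risks.isEmpty then "critical"
    else
      let high_risks := risks.filter (fun r => (PySem.Dict.mk r).get? "severity" == some "high")
      if !high_risks.isEmpty then "high"
      else "medium"

-- ===== PORT B =====
-- the module constant _RANK; keys are the Optional severity values looked up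
-- (Python's dict.get with a possibly-None key: ported with Option String keys)
def pvRank : PySem.Dict (Option String) Int :=
  PySem.Dict.mk [(some "critical", 3), (some "high", 2)]

def assess_injection_risk_level_py_alt (risks : List (List (String × String))) : String :=
  let level : Int :=
    risks.foldl (fun level r => max level (pvRank.getD ((PySem.Dict.mk r).get? "severity") 1)) 0
  (PySem.List.pyGet? ["low", "medium", "high", "critical"] level).getD ""

-- ===== PRECONDITION & SPEC =====
def Spec_assess_injection_risk_level_py (risks : List (List (String × String))) (out : String) : Prop := out = assess_injection_risk_level_py_alt risks
instance (risks : List (List (String × String))) (out : String) : Decidable (Spec_assess_injection_risk_level_py risks out) := by unfold Spec_assess_injection_risk_level_py; infer_instance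

-- ===== CLAIM (what is proved, stated in full; the proofs are below) =====
def Claim_equal_assess_injection_risk_level_py : Prop := ∀ (risks : List (List (String × String))), Dom_assess_injection_risk_level_py risks → Spec_assess_injection_risk_level_py risks (assess_injection_risk_level_py risks)

-- ===== LEMMAS AND PROOFS =====

-- the rank of one risk entry, as B computes it
def pvSevRank (r : List (String × String)) : Int :=
  pvRank.getD ((PySem.Dict.mk r).get? "severity") 1

-- closed form of the fold target: 3 if any critical, else 2 if any high, else 1 if nonempty, else 0
def pvTgt (l : List (List (String × String))) : Int :=
  if l.any (fun r => pvSevRank r == 3) then 3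
  else if l.any (fun r => pvSevRank r == 2) then 2
  else if l.isEmpty then 0 else 1

theorem pvRank_getD (v : Option String) :
    pvRank.getD v 1 = if v = some "critical" then 3 else if v = some "high" then 2 else 1 := by
  by_cases h1 : v = some "critical"
  · subst h1; simp [pvRank, PySem.Dict.getD, PySem.Dict.get?]
  · by_cases h2 : v = some "high"
    · subst h2; simp [pvRank, PySem.Dict.getD, PySem.Dict.get?, List.find?]
    · simp only [pvRank, PySem.Dict.getD, PySem.Dict.get?, h1, h2, if_false]
      simp only [List.find?_cons]
      rw [show (((some "critical" : Option String), (3 : Int)).1 == v) = false by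
            simp [Ne.symm h1],
          show (((some "high" : Option String), (2 : Int)).1 == v) = false by
            simp [Ne.symm h2]]
      simp

theorem pvSevRank_cases (r : List (String × String)) :
    pvSevRank r = 1 ∨ pvSevRank r = 2 ∨ pvSevRank r = 3 := by
  rw [pvSevRank, pvRank_getD]; split_ifs <;> simp

theorem pvSevRank3_iff (r : List (String × String)) :
    pvSevRank r = 3 ↔ (PySem.Dict.mk r).get? "severity" = some "critical" := by
  rw [pvSevRank, pvRank_getD]; split_ifs <;> simp_all

theorem pvSevRank2_iff (r : List (String × String)) :
    pvSevRank r = 2 ↔ (PySem.Dict.mk r).get? "severity" = some "high" := by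
  rw [pvSevRank, pvRank_getD]; split_ifs <;> simp_all

theorem pvTgt_bounds (l : List (List (String × String))) : 0 ≤ pvTgt l ∧ pvTgt l ≤ 3 := by
  unfold pvTgt; split_ifs <;> omega

theorem pvTgt_cons (r : List (String × String)) (l : List (List (String × String))) :
    pvTgt (r :: l) = max (pvSevRank r) (pvTgt l) := by
  have hb := pvTgt_bounds l
  rcases pvSevRank_cases r with h | h | h <;>
    · unfold pvTgt at *
      simp only [List.any_cons, List.isEmpty_cons, h]
      split_ifs at * <;> simp_all

theorem pvFold_eq (l : List (List (String × String))) (a : Int) (ha0 : 0 ≤ a) :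
    l.foldl (fun level r => max level (pvSevRank r)) a = max a (pvTgt l) := by
  induction l generalizing a with
  | nil => unfold pvTgt; simp; omega
  | cons r l ih =>
      have h1 := pvSevRank_cases r
      rw [List.foldl_cons, ih (max a (pvSevRank r)) (by rcases h1 with h|h|h <;> omega),
        pvTgt_cons]
      omega

-- ===== VERDICT (by name: the statement is the Claim_ definition above) =====
theorem assess_injection_risk_level_py_spec : Claim_equal_assess_injection_risk_level_py := by
  intro risks _
  unfold Spec_assess_injection_risk_level_py assess_injection_risk_level_py assess_injection_risk_level_py_alt
  have hfold : risks.foldl (fun level r => max level (pvSevRank r)) 0 = pvTgt risks := by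
    rw [pvFold_eq risks 0 le_rfl]
    have := pvTgt_bounds risks
    omega
  show _ = (PySem.List.pyGet? ["low", "medium", "high", "critical"]
      (risks.foldl (fun level r => max level (pvSevRank r)) 0)).getD ""
  rw [hfold]
  rcases risks with _ | ⟨r, l⟩
  · simp [pvTgt, PySem.List.pyGet?, PySem.List.pyIdx?]
  · have hne : ¬(r :: l).isEmpty := by simp
    unfold pvTgt
    by_cases h3 : (r :: l).any (fun r => pvSevRank r == 3)
    · have : ((r :: l).filter (fun r => (PySem.Dict.mk r).get? "severity" == some "critical")).isEmpty = false := by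
        simp only [List.isEmpty_eq_false_iff, ne_eq, List.filter_eq_nil_iff, not_forall]
        simp only [List.any_eq_true, beq_iff_eq] at h3
        obtain ⟨x, hx, hx3⟩ := h3
        exact ⟨x, hx, by simp [← pvSevRank3_iff, hx3]⟩
      simp [hne, this, h3, PySem.List.pyGet?, PySem.List.pyIdx?]
    · have hc : ((r :: l).filter (fun r => (PySem.Dict.mk r).get? "severity" == some "critical")).isEmpty := by
        simp only [List.isEmpty_iff, List.filter_eq_nil_iff]
        intro x hx
        simp only [List.any_eq_true, beq_iff_eq, not_exists, not_and] at h3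
        simp only [beq_iff_eq, ← pvSevRank3_iff]
        exact h3 x hx
      by_cases h2 : (r :: l).any (fun r => pvSevRank r == 2)
      · have : ((r :: l).filter (fun r => (PySem.Dict.mk r).get? "severity" == some "high")).isEmpty = false := by
          simp only [List.isEmpty_eq_false_iff, ne_eq, List.filter_eq_nil_iff, not_forall]
          simp only [List.any_eq_true, beq_iff_eq] at h2
          obtain ⟨x, hx, hx2⟩ := h2
          exact ⟨x, hx, by simp [← pvSevRank2_iff, hx2]⟩
        simp [hne, hc, this, h3, h2, PySem.List.pyGet?, PySem.List.pyIdx?]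
      · have hh : ((r :: l).filter (fun r => (PySem.Dict.mk r).get? "severity" == some "high")).isEmpty := by
          simp only [List.isEmpty_iff, List.filter_eq_nil_iff]
          intro x hx
          simp only [List.any_eq_true, beq_iff_eq, not_exists, not_and] at h2
          simp only [beq_iff_eq, ← pvSevRank2_iff]
          exact h2 x hx
        simp [hne, hc, hh, h3, h2, PySem.List.pyGet?, PySem.List.pyIdx?]
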